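-- pv_equiv track=rewrite | github.com/CreamMeatball/AlgorithmSolving | 9184_timeover.py | w_dynamic
-- ===== SOURCE A (Python) =====
-- def w_dynamic(a, b, c):
--     dp = [[[0 for _ in range(21)] for _ in range(21)] for _ in range(21)]
--     if a > 20 or b > 20 or c > 20:
--         a = b = c = 20
--     if a <= 0 or b <= 0 or c <= 0:
--         return 1
--     for i in range(21):
--         for j in range(21):
--             for k in range(21):
--                 if i <= 0 or j <= 0 or k <= 0:
--                     dp[i][j][k] = 1
--                     continue
--                 if i < j and j < k:
--                     dp[i][j][k] = dp[i][j][k - 1] + dp[i][j - 1][k - 1] - dp[i][j - 1][k]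
--                     continue
--                 dp[i][j][k] = dp[i - 1][j][k] + dp[i - 1][j - 1][k] + dp[i - 1][j][k - 1] - dp[i - 1][j - 1][k - 1]
--
--     return dp[a][b][c]
-- ===== SOURCE B (Python) =====
-- def w_dynamic(a, b, c):
--     if a > 20 or b > 20 or c > 20:
--         a = b = c = 20
--     if a <= 0 or b <= 0 or c <= 0:
--         return 1
--     memo = {}
--     def w_rec(i, j, k):
--         if (i, j, k) in memo:
--             return memo[(i, j, k)]
--         if i <= 0 or j <= 0 or k <= 0:
--             v = 1
--         elif i < j and j < k:
--             v = w_rec(i, j, k - 1) + w_rec(i, j - 1, k - 1) - w_rec(i, j - 1, k)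
--         else:
--             v = (w_rec(i - 1, j, k) + w_rec(i - 1, j - 1, k)
--                  + w_rec(i - 1, j, k - 1) - w_rec(i - 1, j - 1, k - 1))
--         memo[(i, j, k)] = v
--         return v
--     return w_rec(a, b, c)
-- ===== Notes on version B (the rewrite author's own statement) =====
-- stated objective: alternative
-- what changed: Replaces the unconditional 21x21x21 bottom-up table fill with a memoized top-down recursion that evaluates only the states actually reachable from the (clamped) input, and skips all table work when any argument is non-positive.
import Mathlib
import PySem

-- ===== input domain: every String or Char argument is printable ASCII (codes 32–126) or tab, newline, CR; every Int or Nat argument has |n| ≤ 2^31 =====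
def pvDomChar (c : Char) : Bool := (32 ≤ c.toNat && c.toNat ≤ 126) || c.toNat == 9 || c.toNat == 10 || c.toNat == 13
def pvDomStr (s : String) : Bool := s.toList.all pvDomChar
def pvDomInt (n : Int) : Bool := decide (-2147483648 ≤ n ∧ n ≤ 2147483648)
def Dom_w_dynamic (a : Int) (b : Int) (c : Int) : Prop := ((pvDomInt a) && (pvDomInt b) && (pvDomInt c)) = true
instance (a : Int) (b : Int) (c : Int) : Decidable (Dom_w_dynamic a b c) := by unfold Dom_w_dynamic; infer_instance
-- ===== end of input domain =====

-- B replaces A's unconditional 21^3 bottom-up table fill by a memoized top-down recursion over the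
-- same recurrence, evaluating only reachable states (objective: alternative decomposition).

-- ===== PORT A =====
-- dp[i][j][k] read; all reads in A occur at in-range non-negative indices, so the `.getD` defaults are never used.
def pvGet3 (dp : List (List (List Int))) (i j k : Int) : Int :=
  ((PySem.List.pyGet? ((PySem.List.pyGet? ((PySem.List.pyGet? dp i).getD []) j).getD []) k).getD 0)

-- dp[i][j][k] = v ; all writes in A occur at in-range non-negative indices (pySetD is exact there).
def pvSet3 (dp : List (List (List Int))) (i j k : Int) (v : Int) : List (List (List Int)) :=
  PySem.List.pySetD dp i
    (PySem.List.pySetD ((PySem.List.pyGet? dp i).getD []) j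
      (PySem.List.pySetD ((PySem.List.pyGet? ((PySem.List.pyGet? dp i).getD []) j).getD []) k v))

-- the body of A's innermost loop
def pvStepA (dp : List (List (List Int))) (i j k : Int) : List (List (List Int)) :=
  if i ≤ 0 ∨ j ≤ 0 ∨ k ≤ 0 then pvSet3 dp i j k 1
  else if i < j ∧ j < k then
    pvSet3 dp i j k (pvGet3 dp i j (k-1) + pvGet3 dp i (j-1) (k-1) - pvGet3 dp i (j-1) k)
  else
    pvSet3 dp i j k (pvGet3 dp (i-1) j k + pvGet3 dp (i-1) (j-1) k + pvGet3 dp (i-1) j (k-1)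
                      - pvGet3 dp (i-1) (j-1) (k-1))

-- A's body after the clamp `a = b = c = 20` (Python continues with the reassigned variables)
def pvBodyA (dp0 : List (List (List Int))) (a b c : Int) : Int :=
  if a ≤ 0 ∨ b ≤ 0 ∨ c ≤ 0 then 1
  else
    pvGet3 ((PySem.List.pyRange 0 21 1).foldl (fun dp i =>
      (PySem.List.pyRange 0 21 1).foldl (fun dp j =>
        (PySem.List.pyRange 0 21 1).foldl (fun dp k => pvStepA dp i j k) dp) dp) dp0) a b c

def w_dynamic (a : Int) (b : Int) (c : Int) : Int :=
  let dp0 := (PySem.List.pyRange 0 21 1).map (fun _ =>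
    (PySem.List.pyRange 0 21 1).map (fun _ =>
      (PySem.List.pyRange 0 21 1).map (fun _ => (0 : Int))))
  if a > 20 ∨ b > 20 ∨ c > 20 then pvBodyA dp0 20 20 20 else pvBodyA dp0 a b c

-- ===== PORT B =====
-- Source B's memoized recursive helper w_rec, threading the memo dict explicitly.
-- The Nat fuel is only a structural-termination guard: every call site passes
-- fuel > i.toNat + j.toNat + k.toNat, so the fuel-0 branch is never reached
-- (proved in pvWRec_correct below); it changes no computed value.
def pvWRec : Nat → PySem.Dict (Int × Int × Int) Int → Int → Int → Int →
    Int × PySem.Dict (Int × Int × Int) Int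
  | 0, memo, _, _, _ => (1, memo)
  | fuel + 1, memo, i, j, k =>
    match memo.get? (i, j, k) with
    | some v => (v, memo)
    | none =>
      if i ≤ 0 ∨ j ≤ 0 ∨ k ≤ 0 then (1, memo.insert (i, j, k) 1)
      else if i < j ∧ j < k then
        let r1 := pvWRec fuel memo i j (k-1)
        let r2 := pvWRec fuel r1.2 i (j-1) (k-1)
        let r3 := pvWRec fuel r2.2 i (j-1) k
        let v := r1.1 + r2.1 - r3.1
        (v, r3.2.insert (i, j, k) v)
      else
        let r1 := pvWRec fuel memo (i-1) j k
        let r2 := pvWRec fuel r1.2 (i-1) (j-1) k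
        let r3 := pvWRec fuel r2.2 (i-1) j (k-1)
        let r4 := pvWRec fuel r3.2 (i-1) (j-1) (k-1)
        let v := r1.1 + r2.1 + r3.1 - r4.1
        (v, r4.2.insert (i, j, k) v)

def w_dynamic_alt (a : Int) (b : Int) (c : Int) : Int :=
  if a > 20 ∨ b > 20 ∨ c > 20 then (pvWRec 61 PySem.Dict.empty 20 20 20).1
  else if a ≤ 0 ∨ b ≤ 0 ∨ c ≤ 0 then 1
  else (pvWRec (a.toNat + b.toNat + c.toNat + 1) PySem.Dict.empty a b c).1

-- ===== PRECONDITION & SPEC =====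
def Spec_w_dynamic (a : Int) (b : Int) (c : Int) (out : Int) : Prop := out = w_dynamic_alt a b c
instance (a : Int) (b : Int) (c : Int) (out : Int) : Decidable (Spec_w_dynamic a b c out) := by unfold Spec_w_dynamic; infer_instance

-- ===== CLAIM (what is proved, stated in full; the proofs are below) =====
def Claim_equal_w_dynamic : Prop := ∀ (a : Int) (b : Int) (c : Int), Dom_w_dynamic a b c → Spec_w_dynamic a b c (w_dynamic a b c)

-- ===== LEMMAS AND PROOFS =====

-- the mathematical value of Ackermann's w function (the common spec both ports are proved against)
def pvW (i j k : Int) : Int :=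
  if _h1 : i ≤ 0 ∨ j ≤ 0 ∨ k ≤ 0 then 1
  else if _h2 : i < j ∧ j < k then
    pvW i j (k-1) + pvW i (j-1) (k-1) - pvW i (j-1) k
  else
    pvW (i-1) j k + pvW (i-1) (j-1) k + pvW (i-1) j (k-1) - pvW (i-1) (j-1) (k-1)
termination_by (i.toNat + j.toNat + k.toNat)
decreasing_by all_goals omega

-- ---- B side: the memoized recursion computes pvW ----
def MemoOK (m : PySem.Dict (Int × Int × Int) Int) : Prop :=
  ∀ p v, m.get? p = some v → v = pvW p.1 p.2.1 p.2.2

theorem memoOK_insert (m : PySem.Dict (Int × Int × Int) Int) (i j k : Int)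
    (hm : MemoOK m) (hv : v = pvW i j k) : MemoOK (m.insert (i, j, k) v) := by
  intro p w hw
  rw [PySem.Dict.get?_insert] at hw
  split at hw
  · rename_i hp; cases hw; subst hp; exact hv
  · exact hm p w hw

theorem pvWRec_correct : ∀ (fuel : Nat) (i j k : Int) (m : PySem.Dict (Int × Int × Int) Int),
    i.toNat + j.toNat + k.toNat < fuel → MemoOK m →
    (pvWRec fuel m i j k).1 = pvW i j k ∧ MemoOK (pvWRec fuel m i j k).2 := by
  intro fuel
  induction fuel with
  | zero => intro i j k m hn; omega
  | succ n ih =>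
    intro i j k m hn hm
    cases hg : m.get? (i, j, k) with
    | some v =>
      rw [pvWRec, hg]
      exact ⟨hm (i,j,k) v hg, hm⟩
    | none =>
      rw [pvWRec, hg]
      by_cases h0 : i ≤ 0 ∨ j ≤ 0 ∨ k ≤ 0
      · rw [if_pos h0]
        exact ⟨by rw [pvW, dif_pos h0], memoOK_insert m i j k hm (by rw [pvW, dif_pos h0])⟩
      · rw [if_neg h0]
        by_cases h2 : i < j ∧ j < k
        · rw [if_pos h2]
          obtain ⟨e1, m1⟩ := ih i j (k-1) m (by omega) hm
          obtain ⟨e2, m2⟩ := ih i (j-1) (k-1) _ (by omega) m1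
          obtain ⟨e3, m3⟩ := ih i (j-1) k _ (by omega) m2
          refine ⟨?_, memoOK_insert _ i j k m3 ?_⟩ <;>
            · dsimp only
              rw [pvW, dif_neg h0, dif_pos h2, e1, e2, e3]
        · rw [if_neg h2]
          obtain ⟨e1, m1⟩ := ih (i-1) j k m (by omega) hm
          obtain ⟨e2, m2⟩ := ih (i-1) (j-1) k _ (by omega) m1
          obtain ⟨e3, m3⟩ := ih (i-1) j (k-1) _ (by omega) m2
          obtain ⟨e4, m4⟩ := ih (i-1) (j-1) (k-1) _ (by omega) m3
          refine ⟨?_, memoOK_insert _ i j k m4 ?_⟩ <;>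
            · dsimp only
              rw [pvW, dif_neg h0, dif_neg h2, e1, e2, e3, e4]

-- ---- A side: the table fill computes pvW at every cell ----
def Dims (dp : List (List (List Int))) : Prop :=
  dp.length = 21 ∧ ∀ r ∈ dp, r.length = 21 ∧ ∀ q ∈ r, q.length = 21

def gN (dp : List (List (List Int))) (x y z : Nat) : Int :=
  ((dp.getD x []).getD y []).getD z 0

def sN (dp : List (List (List Int))) (x y z : Nat) (v : Int) : List (List (List Int)) :=
  dp.set x ((dp.getD x []).set y (((dp.getD x []).getD y []).set z v))

def Corr (dp : List (List (List Int))) (N : Nat) : Prop :=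
  ∀ x y z : Nat, x < 21 → y < 21 → z < 21 → 441*x + 21*y + z < N →
    gN dp x y z = pvW (x : Int) (y : Int) (z : Int)

theorem row_mem {dp : List (List (List Int))} {x : Nat} (hD : Dims dp) (hx : x < 21) :
    dp.getD x [] ∈ dp := by
  have h : x < dp.length := by rw [hD.1]; exact hx
  rw [List.getD_eq_getElem dp [] h]
  exact List.getElem_mem h

theorem row_len {dp : List (List (List Int))} {x : Nat} (hD : Dims dp) (hx : x < 21) :
    (dp.getD x []).length = 21 :=
  (hD.2 _ (row_mem hD hx)).1

theorem col_mem {dp : List (List (List Int))} {x y : Nat} (hD : Dims dp) (hx : x < 21) (hy : y < 21) :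
    (dp.getD x []).getD y [] ∈ dp.getD x [] := by
  have h : y < (dp.getD x []).length := by rw [row_len hD hx]; exact hy
  rw [List.getD_eq_getElem _ [] h]
  exact List.getElem_mem h

theorem col_len {dp : List (List (List Int))} {x y : Nat} (hD : Dims dp) (hx : x < 21) (hy : y < 21) :
    ((dp.getD x []).getD y []).length = 21 :=
  (hD.2 _ (row_mem hD hx)).2 _ (col_mem hD hx hy)

theorem dims_sN {dp : List (List (List Int))} {x y z : Nat} (v : Int)
    (hD : Dims dp) (hx : x < 21) (hy : y < 21) : Dims (sN dp x y z v) := by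
  refine ⟨by rw [sN, List.length_set, hD.1], ?_⟩
  intro r hr
  rcases List.mem_or_eq_of_mem_set hr with h | rfl
  · exact hD.2 r h
  · refine ⟨by rw [List.length_set]; exact row_len hD hx, ?_⟩
    intro q hq
    rcases List.mem_or_eq_of_mem_set hq with h2 | rfl
    · exact (hD.2 _ (row_mem hD hx)).2 q h2
    · rw [List.length_set]; exact col_len hD hx hy

theorem getD_set_self' {α : Type} (l : List α) (n : Nat) (a d : α) (h : n < l.length) :
    (l.set n a).getD n d = a := by
  rw [List.getD_eq_getElem?_getD, List.getElem?_set_self h, Option.getD_some]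

theorem getD_set_ne' {α : Type} (l : List α) {n m : Nat} (a d : α) (h : n ≠ m) :
    (l.set n a).getD m d = l.getD m d := by
  rw [List.getD_eq_getElem?_getD, List.getElem?_set_ne h, ← List.getD_eq_getElem?_getD]

theorem gN_sN_self {dp : List (List (List Int))} {x y z : Nat} (v : Int)
    (hD : Dims dp) (hx : x < 21) (hy : y < 21) (hz : z < 21) :
    gN (sN dp x y z v) x y z = v := by
  have h1 : x < dp.length := by rw [hD.1]; exact hx
  have h2 : y < (dp.getD x []).length := by rw [row_len hD hx]; exact hy
  have h3 : z < ((dp.getD x []).getD y []).length := by rw [col_len hD hx hy]; exact hz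
  unfold gN sN
  rw [getD_set_self' dp x _ [] h1, getD_set_self' _ y _ [] h2, getD_set_self' _ z _ 0 h3]

theorem gN_sN_ne {dp : List (List (List Int))} {x y z x' y' z' : Nat} (v : Int)
    (hD : Dims dp) (hx : x < 21) (hy : y < 21)
    (hne : ¬(x' = x ∧ y' = y ∧ z' = z)) :
    gN (sN dp x y z v) x' y' z' = gN dp x' y' z' := by
  have h1 : x < dp.length := by rw [hD.1]; exact hx
  have h2 : y < (dp.getD x []).length := by rw [row_len hD hx]; exact hy
  unfold gN sN
  by_cases hxx : x' = x
  · subst hxx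
    rw [getD_set_self' dp _ _ [] h1]
    by_cases hyy : y' = y
    · subst hyy
      have hzz : z ≠ z' := by tauto
      rw [getD_set_self' _ _ _ [] h2, getD_set_ne' _ _ 0 hzz]
    · rw [getD_set_ne' _ _ [] (fun h => hyy h.symm)]
  · rw [getD_set_ne' _ _ [] (fun h => hxx h.symm)]

theorem pvGet3_natCast (dp : List (List (List Int))) (x y z : Nat) :
    pvGet3 dp (x : Int) (y : Int) (z : Int) = gN dp x y z := by
  simp [pvGet3, gN, List.getD_eq_getElem?_getD]

theorem pvSet3_natCast (dp : List (List (List Int))) (x y z : Nat) (v : Int) :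
    pvSet3 dp (x : Int) (y : Int) (z : Int) v = sN dp x y z v := by
  simp [pvSet3, sN, List.getD_eq_getElem?_getD]

theorem step_corr (dp : List (List (List Int))) (i j k : Nat)
    (hi : i < 21) (hj : j < 21) (hk : k < 21) (hD : Dims dp)
    (hC : Corr dp (441*i + 21*j + k)) :
    Dims (pvStepA dp (i : Int) (j : Int) (k : Int)) ∧
    Corr (pvStepA dp (i : Int) (j : Int) (k : Int)) (441*i + 21*j + k + 1) := by
  unfold pvStepA
  by_cases h0 : (i : Int) ≤ 0 ∨ (j : Int) ≤ 0 ∨ (k : Int) ≤ 0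
  · rw [if_pos h0, pvSet3_natCast]
    refine ⟨dims_sN 1 hD hi hj, ?_⟩
    intro x y z hx hy hz hlt
    by_cases he : x = i ∧ y = j ∧ z = k
    · obtain ⟨rfl, rfl, rfl⟩ := he
      rw [gN_sN_self 1 hD hx hy hz, pvW, dif_pos h0]
    · rw [gN_sN_ne 1 hD hi hj he]
      exact hC x y z hx hy hz (by omega)
  · rw [if_neg h0]
    have hi1 : 1 ≤ i := by omega
    have hj1 : 1 ≤ j := by omega
    have hk1 : 1 ≤ k := by omega
    have ei : (i : Int) - 1 = ((i - 1 : Nat) : Int) := by omega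
    have ej : (j : Int) - 1 = ((j - 1 : Nat) : Int) := by omega
    have ek : (k : Int) - 1 = ((k - 1 : Nat) : Int) := by omega
    by_cases h2 : (i : Int) < (j : Int) ∧ (j : Int) < (k : Int)
    · rw [if_pos h2, ek, ej]
      rw [pvGet3_natCast, pvGet3_natCast, pvGet3_natCast, pvSet3_natCast]
      have r1 := hC i j (k-1) hi hj (by omega) (by omega)
      have r2 := hC i (j-1) (k-1) hi (by omega) (by omega) (by omega)
      have r3 := hC i (j-1) k hi (by omega) hk (by omega)
      refine ⟨dims_sN _ hD hi hj, ?_⟩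
      intro x y z hx hy hz hlt
      by_cases he : x = i ∧ y = j ∧ z = k
      · obtain ⟨rfl, rfl, rfl⟩ := he
        rw [gN_sN_self _ hD hx hy hz, pvW, dif_neg h0, dif_pos h2, ek, ej, r1, r2, r3]
      · rw [gN_sN_ne _ hD hi hj he]
        exact hC x y z hx hy hz (by omega)
    · rw [if_neg h2, ei, ej, ek]
      rw [pvGet3_natCast, pvGet3_natCast, pvGet3_natCast, pvGet3_natCast, pvSet3_natCast]
      have r1 := hC (i-1) j k (by omega) hj hk (by omega)
      have r2 := hC (i-1) (j-1) k (by omega) (by omega) hk (by omega)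
      have r3 := hC (i-1) j (k-1) (by omega) hj (by omega) (by omega)
      have r4 := hC (i-1) (j-1) (k-1) (by omega) (by omega) (by omega) (by omega)
      refine ⟨dims_sN _ hD hi hj, ?_⟩
      intro x y z hx hy hz hlt
      by_cases he : x = i ∧ y = j ∧ z = k
      · obtain ⟨rfl, rfl, rfl⟩ := he
        rw [gN_sN_self _ hD hx hy hz, pvW, dif_neg h0, dif_neg h2, ei, ej, ek, r1, r2, r3, r4]
      · rw [gN_sN_ne _ hD hi hj he]
        exact hC x y z hx hy hz (by omega)

-- the three loop levels, in Nat form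
def FK (dp : List (List (List Int))) (i j n : Nat) : List (List (List Int)) :=
  (List.range n).foldl (fun dp (k : Nat) => pvStepA dp (i : Int) (j : Int) (k : Int)) dp

def FJ (dp : List (List (List Int))) (i m : Nat) : List (List (List Int)) :=
  (List.range m).foldl (fun dp j => FK dp i j 21) dp

def FI (dp : List (List (List Int))) (n : Nat) : List (List (List Int)) :=
  (List.range n).foldl (fun dp i => FJ dp i 21) dp

theorem pyRange21 : PySem.List.pyRange 0 21 1 = List.map (fun k => ((k : Nat) : Int)) (List.range 21) := by
  decide

theorem fold_eq (dp : List (List (List Int))) :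
    (PySem.List.pyRange 0 21 1).foldl (fun dp i =>
      (PySem.List.pyRange 0 21 1).foldl (fun dp j =>
        (PySem.List.pyRange 0 21 1).foldl (fun dp k => pvStepA dp i j k) dp) dp) dp
    = FI dp 21 := by
  rw [pyRange21]
  simp only [List.foldl_map]
  simp only [FI, FJ, FK]

theorem fk_corr (i j : Nat) (hi : i < 21) (hj : j < 21) :
    ∀ n, n ≤ 21 → ∀ dp, Dims dp → Corr dp (441*i + 21*j) →
      Dims (FK dp i j n) ∧ Corr (FK dp i j n) (441*i + 21*j + n) := by
  intro n
  induction n with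
  | zero => intro _ dp hD hC; exact ⟨hD, hC⟩
  | succ n ih =>
    intro hn dp hD hC
    have hFK : FK dp i j (n+1) = pvStepA (FK dp i j n) (i : Int) (j : Int) (n : Int) := by
      unfold FK; rw [List.range_succ, List.foldl_append]; simp only [List.foldl_cons, List.foldl_nil]
    obtain ⟨hD', hC'⟩ := ih (by omega) dp hD hC
    rw [hFK]
    exact step_corr (FK dp i j n) i j n hi hj (by omega) hD' hC'

theorem fj_corr (i : Nat) (hi : i < 21) :
    ∀ m, m ≤ 21 → ∀ dp, Dims dp → Corr dp (441*i) →
      Dims (FJ dp i m) ∧ Corr (FJ dp i m) (441*i + 21*m) := by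
  intro m
  induction m with
  | zero => intro _ dp hD hC; exact ⟨hD, hC⟩
  | succ m ih =>
    intro hm dp hD hC
    have hFJ : FJ dp i (m+1) = FK (FJ dp i m) i m 21 := by
      unfold FJ; rw [List.range_succ, List.foldl_append]; simp only [List.foldl_cons, List.foldl_nil]
    obtain ⟨hD', hC'⟩ := ih (by omega) dp hD hC
    rw [hFJ]
    have h := fk_corr i m hi (by omega) 21 (by omega) _ hD' hC'
    rw [show 441*i + 21*(m+1) = 441*i + 21*m + 21 by ring]
    exact h

theorem fi_corr :
    ∀ n, n ≤ 21 → ∀ dp, Dims dp → Corr dp 0 →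
      Dims (FI dp n) ∧ Corr (FI dp n) (441*n) := by
  intro n
  induction n with
  | zero => intro _ dp hD hC; exact ⟨hD, hC⟩
  | succ n ih =>
    intro hn dp hD hC
    have hFI : FI dp (n+1) = FJ (FI dp n) n 21 := by
      unfold FI; rw [List.range_succ, List.foldl_append]; simp only [List.foldl_cons, List.foldl_nil]
    obtain ⟨hD', hC'⟩ := ih (by omega) dp hD hC
    rw [hFI]
    have h := fj_corr n (by omega) 21 (by omega) _ hD' hC'
    rw [show 441*(n+1) = 441*n + 21*21 by ring]
    exact h

def pvDp0 : List (List (List Int)) :=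
  (PySem.List.pyRange 0 21 1).map (fun _ =>
    (PySem.List.pyRange 0 21 1).map (fun _ =>
      (PySem.List.pyRange 0 21 1).map (fun _ => (0 : Int))))

theorem dims_dp0 : Dims pvDp0 := by unfold Dims; decide

theorem table_full : Dims (FI pvDp0 21) ∧ Corr (FI pvDp0 21) 9261 := by
  have h := fi_corr 21 (by omega) pvDp0 dims_dp0 (by intro x y z _ _ _ h; omega)
  exact ⟨h.1, by have := h.2; norm_num at this; exact this⟩

theorem w_dynamic_eq (a b c : Int) :
    w_dynamic a b c = if a > 20 ∨ b > 20 ∨ c > 20 then pvBodyA pvDp0 20 20 20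
                      else pvBodyA pvDp0 a b c := rfl

theorem bodyA_pvW (a b c : Int)
    (h : 0 < a ∧ a ≤ 20 ∧ 0 < b ∧ b ≤ 20 ∧ 0 < c ∧ c ≤ 20) :
    pvBodyA pvDp0 a b c = pvW a b c := by
  unfold pvBodyA
  rw [if_neg (by omega), fold_eq]
  rw [show a = ((a.toNat : Nat) : Int) by omega,
      show b = ((b.toNat : Nat) : Int) by omega,
      show c = ((c.toNat : Nat) : Int) by omega,
      pvGet3_natCast]
  exact table_full.2 a.toNat b.toNat c.toNat (by omega) (by omega) (by omega) (by omega)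

theorem memoOK_empty : MemoOK PySem.Dict.empty := by
  intro p v h
  rw [PySem.Dict.get?_empty] at h
  cases h

theorem alt_pvW (fuel : Nat) (a b c : Int) (h : a.toNat + b.toNat + c.toNat < fuel) :
    (pvWRec fuel PySem.Dict.empty a b c).1 = pvW a b c :=
  (pvWRec_correct fuel a b c _ h memoOK_empty).1

theorem w_dynamic_spec : Claim_equal_w_dynamic := by
  intro a b c _
  show w_dynamic a b c = w_dynamic_alt a b c
  rw [w_dynamic_eq]
  unfold w_dynamic_alt
  by_cases hcl : a > 20 ∨ b > 20 ∨ c > 20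
  · rw [if_pos hcl, if_pos hcl, bodyA_pvW 20 20 20 (by norm_num), alt_pvW 61 20 20 20 (by decide)]
  · rw [if_neg hcl, if_neg hcl]
    by_cases hng : a ≤ 0 ∨ b ≤ 0 ∨ c ≤ 0
    · rw [if_pos hng]
      unfold pvBodyA
      rw [if_pos hng]
    · rw [if_neg hng, bodyA_pvW a b c (by omega), alt_pvW _ a b c (by omega)]
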